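-- pv_equiv track=rewrite | github.com/freedatensuppe/aoc_2015 | 05/part_1.py | has_vowels
-- ===== SOURCE A (Python) =====
-- vowels = ["a", "e", "i", "o", "u"]
--
-- def has_vowels(s):
--     count = 0
--     for a in s:
--         if a in vowels:
--             count += 1
--         if count > 2:
--             return True
--     return False
-- ===== SOURCE B (Python) =====
-- def has_vowels(s):
--     counts = {}
--     for ch in s:
--         counts[ch] = counts.get(ch, 0) + 1
--     total = (counts.get("a", 0) + counts.get("e", 0) + counts.get("i", 0)
--              + counts.get("o", 0) + counts.get("u", 0))
--     return total >= 3
-- ===== Notes on version B (the rewrite author's own statement) =====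
-- stated objective: alternative
-- what changed: B builds a character histogram in one pass and sums the five vowel entries, replacing A's early-exit membership scan with vowel-counter state.
import Mathlib
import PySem

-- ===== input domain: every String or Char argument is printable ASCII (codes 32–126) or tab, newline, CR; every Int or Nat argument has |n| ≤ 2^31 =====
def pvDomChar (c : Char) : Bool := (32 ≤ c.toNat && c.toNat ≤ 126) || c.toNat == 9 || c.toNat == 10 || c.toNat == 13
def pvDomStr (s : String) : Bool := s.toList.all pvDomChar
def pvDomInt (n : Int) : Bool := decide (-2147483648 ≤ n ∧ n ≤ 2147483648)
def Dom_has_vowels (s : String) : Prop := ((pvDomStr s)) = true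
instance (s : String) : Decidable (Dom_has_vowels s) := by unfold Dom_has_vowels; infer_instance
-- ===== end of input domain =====

-- B replaces A's early-exit membership scan by a one-pass character histogram plus a five-entry vowel-count sum (alternative decomposition, return value identical).


-- ===== PORT A =====
-- vowels = ["a", "e", "i", "o", "u"]  (module-level constant; iterating a str yields 1-char strings)
def pyVowels : List String := ["a", "e", "i", "o", "u"]

-- the for-loop of A with its early return, state = count
def hasVowelsLoop : List Char → Int → Bool
  | [], _ => false
  | a :: rest, count =>
    let count := if pyVowels.contains (String.ofList [a]) then count + 1 else count
    if count > 2 then true else hasVowelsLoop rest count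

def has_vowels (s : String) : Bool := hasVowelsLoop s.toList 0

-- ===== PORT B =====
def has_vowels_alt (s : String) : Bool :=
  let counts : PySem.Dict Char Int :=
    s.toList.foldl (fun d ch => d.insert ch (d.getD ch 0 + 1)) PySem.Dict.empty
  let total := counts.getD 'a' 0 + counts.getD 'e' 0 + counts.getD 'i' 0
             + counts.getD 'o' 0 + counts.getD 'u' 0
  decide (3 ≤ total)

-- ===== PRECONDITION & SPEC =====
def Spec_has_vowels (s : String) (out : Bool) : Prop := out = has_vowels_alt s
instance (s : String) (out : Bool) : Decidable (Spec_has_vowels s out) := by unfold Spec_has_vowels; infer_instance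

-- ===== CLAIM (what is proved, stated in full; the proofs are below) =====
def Claim_equal_has_vowels : Prop := ∀ (s : String), Dom_has_vowels s → Spec_has_vowels s (has_vowels s)

-- ===== LEMMAS AND PROOFS =====

def isVowelChar (a : Char) : Bool :=
  a == 'a' || (a == 'e' || (a == 'i' || (a == 'o' || a == 'u')))

-- the membership test of A, reduced to a test on the character
theorem pyVowels_contains (a : Char) :
    pyVowels.contains (String.ofList [a]) = isVowelChar a := by
  have h : ∀ t : String, (String.ofList [a] == t) = ([a] == t.toList) := fun t => by
    simp [String.ext_iff]
  simp only [pyVowels, List.contains_cons, List.contains_nil, Bool.or_false, h]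
  simp [isVowelChar]

-- A's loop computes "at least 3 vowels", for any start count ≤ 2
theorem hasVowelsLoop_eq (cs : List Char) :
    ∀ count : Int, count ≤ 2 →
      hasVowelsLoop cs count = decide (3 ≤ count + (cs.countP isVowelChar : Int)) := by
  induction cs with
  | nil => intro count h; simp [hasVowelsLoop]; omega
  | cons a t ih =>
    intro count h
    cases hv : isVowelChar a with
    | true =>
      simp only [hasVowelsLoop, pyVowels_contains, hv, if_true, List.countP_cons]
      by_cases h3 : count + 1 > 2
      · rw [if_pos h3]
        symm
        rw [decide_eq_true_eq]
        push_cast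
        omega
      · rw [if_neg h3, ih (count + 1) (by omega)]
        simp only [decide_eq_decide]
        push_cast
        omega
    | false =>
      simp only [hasVowelsLoop, pyVowels_contains, hv, Bool.false_eq_true, if_false,
        List.countP_cons]
      rw [if_neg (by omega : ¬ count > 2), ih count h]
      simp only [decide_eq_decide]
      push_cast
      omega

-- count of vowel characters = sum of the five per-vowel counts
theorem countP_vowels (cs : List Char) :
    (cs.countP isVowelChar : Int) =
      cs.count 'a' + cs.count 'e' + cs.count 'i' + cs.count 'o' + cs.count 'u' := by
  induction cs with
  | nil => simp
  | cons a t ih =>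
    simp only [List.countP_cons, List.count_cons, isVowelChar]
    rcases Bool.eq_false_or_eq_true (a == 'a') with h | h <;>
    rcases Bool.eq_false_or_eq_true (a == 'e') with h2 | h2 <;>
    rcases Bool.eq_false_or_eq_true (a == 'i') with h3 | h3 <;>
    rcases Bool.eq_false_or_eq_true (a == 'o') with h4 | h4 <;>
    rcases Bool.eq_false_or_eq_true (a == 'u') with h5 | h5 <;>
      simp_all [beq_iff_eq] <;> omega

-- ===== VERDICT (by name: the statement is the Claim_ definition above) =====
theorem has_vowels_spec : Claim_equal_has_vowels := by
  intro s _
  unfold Spec_has_vowels has_vowels has_vowels_alt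
  rw [hasVowelsLoop_eq s.toList 0 (by omega)]
  simp only [PySem.Dict.getD_foldl_insert_add_one, PySem.Dict.getD_empty]
  rw [countP_vowels]
  norm_num
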